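-- pv_equiv track=rewrite | github.com/juanis2112/URosario | 2019-1/Logica/Taller7.py | Regla1
-- ===== SOURCE A (Python) =====
-- def Regla1(LetrasProposicionales):
--     conjunciones = ''
--     inicial= True
--     for p in LetrasProposicionales:
--         aux1 = [x for x in LetrasProposicionales if x != p] # Todas las letras excepto p
--         for q in aux1:
--             aux2 = [x for x in aux1 if x != q] # Todas las letras excepto p y q
--             for r in aux2:
--                 literal = r + q + p + 'Y'+'Y'
--                 aux3 = [x + '-' for x in aux2 if x != r]
--                 for k in aux3:
--                     literal = k + literal + 'Y'
--                 if inicial: # Inicializar la primera conjuncion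
--                     conjunciones = literal
--                     inicial = False
--                 else:
--                     conjunciones = literal + conjunciones + 'O'
--     return conjunciones
-- ===== SOURCE B (Python) =====
-- def Regla1(LetrasProposicionales):
--     # Recursive generator of ordered length-k selections (choosing a value removes
--     # all of its copies), paired with the leftover letters; the formula string is
--     # then assembled once in closed form instead of incremental accumulation.
--     def pick(k, avail):
--         if k == 0:
--             return [([], avail)]
--         return [([v] + chosen, left)
--                 for v in avail
--                 for chosen, left in pick(k - 1, [x for x in avail if x != v])]
--     lits = []
--     for (p, q, r), left in pick(3, LetrasProposicionales):
--         prefix = ''.join(x + '-' for x in reversed(left))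
--         lits.append(prefix + r + q + p + 'YY' + 'Y' * len(left))
--     if not lits:
--         return ''
--     return ''.join(reversed(lits)) + 'O' * (len(lits) - 1)
-- ===== Notes on version B (the rewrite author's own statement) =====
-- stated objective: alternative
-- what changed: Replaces A's three hardcoded nested loops and two incremental string accumulators by a recursive generator pick(k, avail) of ordered length-k value-distinct selections paired with the leftover letters, then assembles each literal in closed form and the whole formula with one reversed join plus 'O'*(len-1).
import Mathlib
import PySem

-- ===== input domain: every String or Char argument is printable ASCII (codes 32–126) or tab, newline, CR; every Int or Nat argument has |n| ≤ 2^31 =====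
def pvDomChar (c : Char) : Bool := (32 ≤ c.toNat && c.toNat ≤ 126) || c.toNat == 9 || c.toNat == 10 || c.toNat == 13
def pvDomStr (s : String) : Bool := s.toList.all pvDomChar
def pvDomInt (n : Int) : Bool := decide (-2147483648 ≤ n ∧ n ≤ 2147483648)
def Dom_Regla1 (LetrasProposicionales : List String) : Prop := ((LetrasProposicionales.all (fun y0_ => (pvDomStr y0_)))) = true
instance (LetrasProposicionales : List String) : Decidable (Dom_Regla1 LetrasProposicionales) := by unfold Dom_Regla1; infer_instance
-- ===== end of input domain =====

-- B replaces A's three nested loops and two incremental string accumulators by a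
-- recursive selection generator plus one closed-form final assembly ("alternative").

-- ===== PORT A =====
def Regla1 (LetrasProposicionales : List String) : String :=
  (LetrasProposicionales.foldl (fun st p =>
    let aux1 := LetrasProposicionales.filter (fun x => x ≠ p)
    aux1.foldl (fun st q =>
      let aux2 := aux1.filter (fun x => x ≠ q)
      aux2.foldl (fun st r =>
        let lit0 := r ++ q ++ p ++ "Y" ++ "Y"
        let aux3 := (aux2.filter (fun x => x ≠ r)).map (fun x => x ++ "-")
        let literal := aux3.foldl (fun l k => k ++ l ++ "Y") lit0
        if st.2 then (literal, false) else (literal ++ st.1 ++ "O", false)) st) st)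
    ("", true)).1

-- ===== PORT B =====
-- recursive generator of ordered length-k value-distinct selections + leftovers
def pvPick : Nat → List String → List (List String × List String)
  | 0, avail => [([], avail)]
  | k + 1, avail =>
      avail.flatMap (fun v =>
        (pvPick k (avail.filter (fun x => x ≠ v))).map (fun cl => (v :: cl.1, cl.2)))

def Regla1_altLit (left : List String) (p q r : String) : String :=
  String.join (left.reverse.map (fun x => x ++ "-")) ++ r ++ q ++ p ++ "YY"
    ++ String.ofList (List.replicate left.length 'Y')

def Regla1_alt (LetrasProposicionales : List String) : String :=
  let lits := (pvPick 3 LetrasProposicionales).map (fun t =>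
    match t with
    | ([p, q, r], left) => Regla1_altLit left p q r
    | _ => "")
  if lits = [] then ""
  else String.join lits.reverse ++ String.ofList (List.replicate (lits.length - 1) 'O')

-- ===== PRECONDITION & SPEC =====
def Spec_Regla1 (LetrasProposicionales : List String) (out : String) : Prop := out = Regla1_alt LetrasProposicionales
instance (LetrasProposicionales : List String) (out : String) : Decidable (Spec_Regla1 LetrasProposicionales out) := by unfold Spec_Regla1; infer_instance

-- ===== CLAIM =====
def Claim_equal_Regla1 : Prop := ∀ (LetrasProposicionales : List String), Dom_Regla1 LetrasProposicionales → Spec_Regla1 LetrasProposicionales (Regla1 LetrasProposicionales)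

-- ===== LEMMAS AND PROOFS =====

-- A's combiner over one literal
def pvStep (st : String × Bool) (l : String) : String × Bool :=
  if st.2 then (l, false) else (l ++ st.1 ++ "O", false)

-- closed form of A's inner literal loop (in map-fused form)
theorem pvInnerLoop (ks : List String) (l0 : String) :
    ks.foldl (fun l x => x ++ "-" ++ l ++ "Y") l0
      = String.join (ks.reverse.map (fun x => x ++ "-")) ++ l0
          ++ String.ofList (List.replicate ks.length 'Y') := by
  induction ks generalizing l0 with
  | nil => apply String.ext; simp [String.join]
  | cons k ks ih =>
      simp only [List.foldl_cons, ih, List.reverse_cons, List.length_cons]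
      apply String.ext
      simp [List.append_assoc]
      rw [List.replicate_succ]

-- the inner literal of A equals B's closed-form literal
theorem pvLit_eq (aux2 : List String) (p q r : String) :
    (aux2.filter (fun x => x ≠ r)).foldl
        (fun l x => x ++ "-" ++ l ++ "Y") (r ++ q ++ p ++ "Y" ++ "Y")
      = Regla1_altLit (aux2.filter (fun x => x ≠ r)) p q r := by
  rw [pvInnerLoop]
  simp only [Regla1_altLit]
  apply String.ext
  simp [List.append_assoc]

-- closed form of A's accumulation over the literal list
theorem pvAccum (L : List String) (hL : L ≠ []) :
    L.foldl pvStep ("", true)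
      = (String.join L.reverse ++ String.ofList (List.replicate (L.length - 1) 'O'), false) := by
  induction L using List.reverseRecOn with
  | nil => exact absurd rfl hL
  | append_singleton M l ih =>
      rcases eq_or_ne M [] with h | h
      · subst h
        refine Prod.ext ?_ rfl
        apply String.ext
        simp [pvStep, String.join]
      · rw [List.foldl_append, ih h]
        obtain ⟨n, hn⟩ : ∃ n, M.length = n + 1 :=
          ⟨M.length - 1, by have := List.length_pos_iff.mpr h; omega⟩
        simp only [List.foldl_cons, List.foldl_nil, pvStep, Bool.false_eq_true, if_false]
        refine Prod.ext ?_ rfl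
        apply String.ext
        simp [hn, List.replicate_succ', List.append_assoc]

theorem pvTop (L : List String) :
    (L.foldl pvStep ("", true)).1
      = if L = [] then ""
        else String.join L.reverse ++ String.ofList (List.replicate (L.length - 1) 'O') := by
  rcases eq_or_ne L [] with h | h
  · simp [h]
  · rw [pvAccum L h]; simp [h]

theorem pvFoldlExt {α β : Type} (f g : β → α → β) (h : ∀ b a, f b a = g b a)
    (init : β) (l : List α) : l.foldl f init = l.foldl g init := by
  have hfg : f = g := funext fun b => funext (h b)
  rw [hfg]

-- B's literal list, in the flatMap form A's flattened loop produces
theorem pvPick3_map (LP : List String) :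
    (pvPick 3 LP).map (fun t =>
      match t with
      | ([p, q, r], left) => Regla1_altLit left p q r
      | _ => "")
      = LP.flatMap (fun p =>
          let aux1 := LP.filter (fun x => x ≠ p)
          aux1.flatMap (fun q =>
            let aux2 := aux1.filter (fun x => x ≠ q)
            aux2.map (fun r => Regla1_altLit (aux2.filter (fun x => x ≠ r)) p q r))) := by
  simp only [pvPick, List.map_flatMap, List.map_map]
  refine congrArg (fun f => List.flatMap f LP) (funext fun p => ?_)
  refine congrArg (fun f => List.flatMap f _) (funext fun q => ?_)
  rw [List.map_eq_flatMap]
  refine congrArg (fun f => List.flatMap f _) (funext fun r => ?_)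
  simp [Function.comp, List.filter_filter]

-- A's nested fold, rewritten as a fold of pvStep over B's flattened literal list
theorem pvFlatten (LP : List String) :
    Regla1 LP = ((LP.flatMap (fun p =>
      let aux1 := LP.filter (fun x => x ≠ p)
      aux1.flatMap (fun q =>
        let aux2 := aux1.filter (fun x => x ≠ q)
        aux2.map (fun r => Regla1_altLit (aux2.filter (fun x => x ≠ r)) p q r)))).foldl
          pvStep ("", true)).1 := by
  simp only [Regla1, List.foldl_flatMap, List.foldl_map]
  refine congrArg Prod.fst ?_
  refine pvFoldlExt _ _ (fun st p => ?_) _ _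
  refine pvFoldlExt _ _ (fun st q => ?_) _ _
  refine pvFoldlExt _ _ (fun st r => ?_) _ _
  simp only [pvStep]
  rw [pvLit_eq]

theorem Regla1_eq_alt (LP : List String) : Regla1 LP = Regla1_alt LP := by
  rw [pvFlatten]
  simp only [Regla1_alt, pvPick3_map]
  exact pvTop _

-- ===== VERDICT =====
theorem Regla1_spec : Claim_equal_Regla1 := by
  intro LP _
  exact Regla1_eq_alt LP
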